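-- pv_equiv track=rewrite | github.com/Nexus-Digital-Automations/Keyboard-Maestro-MCP-2 | src/cloud/aws_connector.py | _validate_s3_bucket_name
-- ===== SOURCE A (Python) =====
-- def _validate_s3_bucket_name(bucket_name: str) -> bool:
--     """Validate S3 bucket naming requirements."""
--     if len(bucket_name) < 3 or len(bucket_name) > 63:
--         return False
--
--     # Must be lowercase alphanumeric with hyphens
--     if not all(c.islower() or c.isdigit() or c == '-' for c in bucket_name):
--         return False
--
--     # Cannot start or end with hyphen
--     if bucket_name.startswith('-') or bucket_name.endswith('-'):
--         return False
--
--     # Cannot contain consecutive hyphens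
--     if '--' in bucket_name:
--         return False
--
--     return True
-- ===== SOURCE B (Python) =====
-- def _validate_s3_bucket_name(bucket_name: str) -> bool:
--     """Validate S3 bucket naming requirements (single pass)."""
--     if len(bucket_name) < 3 or len(bucket_name) > 63:
--         return False
--     prev = '-'  # hyphen sentinel: a leading hyphen then reads as a consecutive pair
--     for c in bucket_name:
--         if not (c.islower() or c.isdigit() or c == '-'):
--             return False
--         if prev == '-' and c == '-':
--             return False
--         prev = c
--     return prev != '-'
-- ===== Notes on version B (the rewrite author's own statement) =====
-- stated objective: alternative
-- what changed: Replaces A's four separate scans (all(), startswith/endswith, double-hyphen substring search) with one pass tracking the previous character; a hyphen sentinel for prev subsumes the leading-hyphen check and the final prev value gives the trailing-hyphen check.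
import Mathlib
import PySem

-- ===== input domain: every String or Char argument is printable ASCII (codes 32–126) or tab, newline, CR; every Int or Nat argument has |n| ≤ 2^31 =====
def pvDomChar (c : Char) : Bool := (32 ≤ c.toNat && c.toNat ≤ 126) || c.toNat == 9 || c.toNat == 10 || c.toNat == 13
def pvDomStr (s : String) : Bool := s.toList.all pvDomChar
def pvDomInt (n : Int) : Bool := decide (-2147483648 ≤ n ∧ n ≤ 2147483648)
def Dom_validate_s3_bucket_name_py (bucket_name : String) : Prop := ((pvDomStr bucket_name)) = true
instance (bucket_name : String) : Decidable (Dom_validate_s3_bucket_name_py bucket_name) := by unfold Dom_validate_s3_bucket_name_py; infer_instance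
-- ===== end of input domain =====

-- B replaces A's four separate scans by a single pass tracking the previous character ('alternative' decomposition, same O(n) cost).

-- ===== PORT A =====
def validate_s3_bucket_name_py (bucket_name : String) : Bool :=
  if PySem.Str.len bucket_name < 3 || PySem.Str.len bucket_name > 63 then false
  else if !(bucket_name.toList.all (fun c => PySem.Chars.islower c || PySem.Chars.isdigit c || c == '-')) then false
  else if PySem.Str.startswith bucket_name "-" || PySem.Str.endswith bucket_name "-" then false
  else if PySem.Str.isIn "--" bucket_name then false
  else true

-- ===== PORT B =====
-- the single-pass loop of Source B: prev carries the previous character (hyphen sentinel at entry)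
def pvLoopB : Char → List Char → Bool
  | prev, [] => prev != '-'
  | prev, c :: rest =>
    if !(PySem.Chars.islower c || PySem.Chars.isdigit c || c == '-') then false
    else if prev == '-' && c == '-' then false
    else pvLoopB c rest

def validate_s3_bucket_name_py_alt (bucket_name : String) : Bool :=
  if PySem.Str.len bucket_name < 3 || PySem.Str.len bucket_name > 63 then false
  else pvLoopB '-' bucket_name.toList

-- ===== PRECONDITION & SPEC =====
def Spec_validate_s3_bucket_name_py (bucket_name : String) (out : Bool) : Prop := out = validate_s3_bucket_name_py_alt bucket_name
instance (bucket_name : String) (out : Bool) : Decidable (Spec_validate_s3_bucket_name_py bucket_name out) := by unfold Spec_validate_s3_bucket_name_py; infer_instance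

-- ===== CLAIM (what is proved, stated in full; the proofs are below) =====
def Claim_equal_validate_s3_bucket_name_py : Prop := ∀ (bucket_name : String), Dom_validate_s3_bucket_name_py bucket_name → Spec_validate_s3_bucket_name_py bucket_name (validate_s3_bucket_name_py bucket_name)

-- ===== LEMMAS AND PROOFS =====

def pvValid (c : Char) : Bool := PySem.Chars.islower c || PySem.Chars.isdigit c || c == '-'

-- "no two consecutive hyphens"
def pvNoDD : List Char → Bool
  | [] => true
  | [_] => true
  | a :: b :: t => !(a == '-' && b == '-') && pvNoDD (b :: t)

lemma pvLoopB_eq (l : List Char) : ∀ p, pvLoopB p l =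
    (l.all pvValid && pvNoDD (p :: l) && (l.getLastD p != '-')) := by
  induction l with
  | nil => intro p; simp [pvLoopB, pvNoDD]
  | cons c t ih =>
    intro p
    simp only [pvLoopB, pvNoDD, List.all_cons, List.getLastD_cons, ih c, pvValid]
    by_cases hv : (PySem.Chars.islower c || PySem.Chars.isdigit c || c == '-') = true
    · by_cases hp : (p == '-' && c == '-') = true
      · simp [hv, hp]
      · simp only [Bool.not_eq_true] at hp
        simp [hv, hp, Bool.and_assoc]
    · simp only [Bool.not_eq_true] at hv; simp [hv]

lemma pvIsIn_dd (l : List Char) : PySem.Chars.isIn ['-', '-'] l = !(pvNoDD l) := by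
  rw [Bool.eq_iff_iff, PySem.Chars.isIn_iff_infix]
  induction l with
  | nil => simp [pvNoDD]
  | cons a t ih =>
    rw [List.infix_cons_iff]
    cases t with
    | nil => simp [pvNoDD, List.cons_prefix_cons]
    | cons b t' =>
      rw [ih]
      by_cases ha : a = '-'
      · by_cases hb : b = '-'
        · subst ha; subst hb
          simp [pvNoDD, List.cons_prefix_cons]
        · simp [pvNoDD, List.cons_prefix_cons, ha, hb]
          exact fun h => absurd h.symm hb
      · simp [pvNoDD, List.cons_prefix_cons, ha]
        exact fun h _ => absurd h.symm ha

lemma pvStarts (l : List Char) : PySem.Chars.startswith l ['-'] = (l.head? == some '-') := by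
  rw [Bool.eq_iff_iff, PySem.Chars.startswith_iff]
  cases l with
  | nil => simp
  | cons a t =>
    simp only [List.cons_prefix_cons, List.nil_prefix, and_true, List.head?_cons,
      beq_iff_eq, Option.some_inj]
    exact eq_comm

lemma pvEnds (l : List Char) : PySem.Chars.endswith l ['-'] = (l.getLast? == some '-') := by
  rw [Bool.eq_iff_iff, PySem.Chars.endswith_iff]
  have h1 : ['-'] <:+ l ↔ ['-'] <+: l.reverse := by
    rw [← List.reverse_prefix]; simp
  rw [h1, ← PySem.Chars.startswith_iff, pvStarts, List.head?_reverse]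

theorem validate_s3_bucket_name_py_spec : Claim_equal_validate_s3_bucket_name_py := by
  intro s _
  unfold Spec_validate_s3_bucket_name_py validate_s3_bucket_name_py validate_s3_bucket_name_py_alt
  by_cases hlen : (PySem.Str.len s < 3 || PySem.Str.len s > 63 : Bool) = true
  · rw [if_pos hlen, if_pos hlen]
  · rw [if_neg hlen, if_neg hlen]
    have hne : s.toList ≠ [] := by
      simp only [Bool.or_eq_true, decide_eq_true_eq, not_or, not_lt, PySem.Str.len_eq] at hlen
      intro hx; rw [hx] at hlen; simp at hlen
    obtain ⟨c, t, hct⟩ := List.exists_cons_of_ne_nil hne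
    have hx : (c :: t).getLast? = some ((c :: t).getLast (by simp)) :=
      List.getLast?_eq_some_getLast (by simp)
    set x := (c :: t).getLast (by simp) with hxdef
    have hloop : pvLoopB '-' s.toList =
        (s.toList.all pvValid && (!(c == '-') && pvNoDD (c :: t)) && (x != '-')) := by
      rw [pvLoopB_eq, hct]
      have h1 : pvNoDD ('-' :: c :: t) = (!(c == '-') && pvNoDD (c :: t)) := by
        simp [pvNoDD]
      have h2 : (c :: t).getLastD '-' = x := by
        rw [List.getLastD_eq_getLast?, hx]; rfl
      rw [h1, h2]
    have hsw : PySem.Str.startswith s "-" = (c == '-') := by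
      rw [PySem.Str.startswith_eq]
      show PySem.Chars.startswith s.toList ('-' :: []) = (c == '-')
      rw [hct, pvStarts]; simp
    have hew : PySem.Str.endswith s "-" = (x == '-') := by
      rw [PySem.Str.endswith_eq]
      show PySem.Chars.endswith s.toList ('-' :: []) = (x == '-')
      rw [hct, pvEnds, hx]; simp
    have hin : PySem.Str.isIn "--" s = !(pvNoDD (c :: t)) := by
      rw [PySem.Str.isIn_eq]
      show PySem.Chars.isIn ('-' :: '-' :: []) s.toList = _
      rw [hct, pvIsIn_dd]
    have hallv : (s.toList.all fun c => PySem.Chars.islower c || PySem.Chars.isdigit c || c == '-')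
        = s.toList.all pvValid := rfl
    rw [hsw, hew, hin, hallv, hloop]
    by_cases ha : s.toList.all pvValid = true
    · rw [ha, if_neg (by simp)]
      by_cases hc : (c == '-') = true
      · rw [if_pos (by simp [hc])]; simp [hc]
      · simp only [Bool.not_eq_true] at hc
        by_cases hxd : (x == '-') = true
        · rw [if_pos (by simp [hxd])]
          have hx' : x = '-' := by simpa using hxd
          simp [hx']
        · simp only [Bool.not_eq_true] at hxd
          rw [if_neg (by simp [hc, hxd])]
          by_cases hnd : pvNoDD (c :: t) = true
          · rw [if_neg (by simp [hnd])]
            have hx' : ¬ x = '-' := by simpa using hxd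
            have hc' : ¬ c = '-' := by simpa using hc
            rw [hct] at ha
            simp [hc', hx', hnd]
          · simp only [Bool.not_eq_true] at hnd
            rw [if_pos (by simp [hnd])]; simp [hnd]
    · simp only [Bool.not_eq_true] at ha
      rw [ha, if_pos (by simp)]; simp
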